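-- pv_equiv track=rewrite | github.com/guozixu2001/neuromesh-interview | first_question.py | min_subsequences
-- ===== SOURCE A (Python) =====
-- def min_subsequences(source, target):
--     if any(ch not in source for ch in target):
--         return -1
--
--     result = 0
--     i = 0  # iterator of source
--     j = 0  # iterator of target
--
--     while j < len(target):
--         found = False
--         while i < len(source):
--             if source[i] == target[j]:
--                 j += 1
--                 found = True
--                 if j == len(target):
--                     return result + 1
--             i += 1
--
--         if not found:
--             return -1
--
--         result += 1
--         i = 0
--
--     return result
-- ===== SOURCE B (Python) =====
-- def min_subsequences(source, target):
--     # pos[ch] = increasing list of indices where ch occurs in source; jump through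
--     # target with a binary search for the first occurrence >= i, wrapping on failure.
--     pos = {}
--     for idx, ch in enumerate(source):
--         pos.setdefault(ch, []).append(idx)
--     result = 1 if target else 0
--     i = 0
--     for ch in target:
--         lst = pos.get(ch)
--         if lst is None:
--             return -1
--         lo, hi = 0, len(lst)
--         while lo < hi:
--             mid = (lo + hi) // 2
--             if lst[mid] < i:
--                 lo = mid + 1
--             else:
--                 hi = mid
--         if lo == len(lst):
--             result += 1
--             i = lst[0] + 1
--         else:
--             i = lst[lo] + 1
--     return result
-- ===== Notes on version B (the rewrite author's own statement) =====
-- stated objective: alternative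
-- what changed: A repeatedly rescans source left-to-right (restarting from index 0 on every wrap of its nested while loops); B builds per-character occurrence-index lists in one pass over source and then, for each target character, binary-searches that character's list for the first occurrence >= the current position, wrapping to the list head when none exists.
import Mathlib
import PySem

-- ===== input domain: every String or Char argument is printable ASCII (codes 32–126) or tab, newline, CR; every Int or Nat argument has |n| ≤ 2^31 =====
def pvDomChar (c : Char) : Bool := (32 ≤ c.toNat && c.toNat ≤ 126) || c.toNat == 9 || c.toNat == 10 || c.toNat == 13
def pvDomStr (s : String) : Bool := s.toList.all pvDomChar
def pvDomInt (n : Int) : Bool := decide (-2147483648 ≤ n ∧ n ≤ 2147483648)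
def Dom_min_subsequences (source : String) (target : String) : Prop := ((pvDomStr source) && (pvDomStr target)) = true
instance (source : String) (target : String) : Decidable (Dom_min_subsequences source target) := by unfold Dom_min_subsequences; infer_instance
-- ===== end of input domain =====

-- B replaces A's repeated left-to-right rescans of `source` (nested while loops) with
-- per-character occurrence-index lists built once and a binary search per target character
-- (an alternative algorithm; equal return value proved below).

-- ===== PORT A =====
-- inner `while i < len(source)` loop; state (i, j, found); all indexing is in range
-- whenever Python reaches it, so `List.getD` is exact here.
def aInner (s t : List Char) (result : Int) (i j : Nat) (found : Bool) :
    Int ⊕ (Nat × Bool) :=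
  if _h : i < s.length then
    if s.getD i default == t.getD j default then
      if j + 1 = t.length then Sum.inl (result + 1)
      else aInner s t result (i + 1) (j + 1) true
    else aInner s t result (i + 1) j found
  else Sum.inr (j, found)
termination_by s.length - i
decreasing_by all_goals exact Nat.sub_succ_lt_self _ _ _h

-- termination helper for the outer loop: a pass that continues has advanced j
theorem aInner_inr (s t : List Char) (result : Int) (i j : Nat) (found : Bool)
    (j' : Nat) (f' : Bool) (h : aInner s t result i j found = Sum.inr (j', f')) :
    (found = true → f' = true) ∧ j ≤ j' ∧ (f' = true → found = true ∨ j < j') := by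
  fun_induction aInner s t result i j found with
  | case1 => exact (by simp at h)
  | case2 i j found _ _ _ ih =>
    rcases ih h with ⟨h1, h2, _⟩
    exact ⟨fun _ => h1 rfl, by omega, fun _ => Or.inr (by omega)⟩
  | case3 i j found _ _ ih => exact ih h
  | case4 =>
    cases h
    exact ⟨fun hf => hf, le_refl _, fun hf => Or.inl hf⟩

-- outer `while j < len(target)` loop (each pass restarts the source iterator at 0)
def aOuter (s t : List Char) (result : Int) (j : Nat) : Int :=
  if hj : j < t.length then
    match h : aInner s t result 0 j false with
    | Sum.inl ans => ans
    | Sum.inr (j', found) =>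
      if hf : found then aOuter s t (result + 1) j' else -1
  else result
termination_by t.length - j
decreasing_by
  rcases (aInner_inr s t result 0 j false j' found h).2.2 hf with h' | h'
  · exact absurd h' (by simp)
  · exact Nat.sub_lt_sub_left hj h'

def min_subsequences (source : String) (target : String) : Int :=
  let s := source.toList
  let t := target.toList
  if t.any (fun ch => !(s.contains ch)) then -1
  else aOuter s t 0 0

-- ===== PORT B =====
-- `pos = {}; for idx, ch in enumerate(source): pos.setdefault(ch, []).append(idx)`
def buildPos (s : List Char) : PySem.Dict Char (List Int) :=
  (PySem.List.enumerate s 0).foldl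
    (fun d p => d.modify p.2 [] (· ++ [p.1])) PySem.Dict.empty

-- hand-written binary search from Source B: first position in lst[lo:hi] with value ≥ i.
-- lo, hi are Python ints that stay ≥ 0, so Nat and Nat division `(lo+hi)/2` are exact.
def bsearch (lst : List Int) (i : Int) (lo hi : Nat) : Nat :=
  if h : lo < hi then
    let mid := (lo + hi) / 2
    if lst.getD mid 0 < i then bsearch lst i (mid + 1) hi
    else bsearch lst i lo mid
  else lo
termination_by hi - lo
decreasing_by
  · have h1 : lo ≤ (lo + hi) / 2 := (Nat.le_div_iff_mul_le (by norm_num)).2 (by omega)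
    exact Nat.sub_lt_sub_left h (Nat.lt_succ_of_le h1)
  · have h1 : lo ≤ (lo + hi) / 2 := (Nat.le_div_iff_mul_le (by norm_num)).2 (by omega)
    have h2 : (lo + hi) / 2 < hi := (Nat.div_lt_iff_lt_mul (by norm_num)).2 (by omega)
    exact Nat.sub_lt_sub_right h1 h2

-- `for ch in target:` loop of Source B; list indexing (lst[0], lst[lo]) is in range whenever
-- Python reaches it, so `List.getD` is exact.
def bLoop (pos : PySem.Dict Char (List Int)) (t : List Char) (result : Int) (i : Int) : Int :=
  match t with
  | [] => result
  | ch :: rest =>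
    match pos.get? ch with
    | none => -1
    | some lst =>
      let lo := bsearch lst i 0 lst.length
      if lo = lst.length then
        bLoop pos rest (result + 1) (lst.getD 0 0 + 1)
      else bLoop pos rest result (lst.getD lo 0 + 1)

def min_subsequences_alt (source : String) (target : String) : Int :=
  let pos := buildPos source.toList
  let result : Int := if target.toList = [] then 0 else 1
  bLoop pos target.toList result 0

-- ===== PRECONDITION & SPEC =====
def Spec_min_subsequences (source : String) (target : String) (out : Int) : Prop := out = min_subsequences_alt source target
instance (source : String) (target : String) (out : Int) : Decidable (Spec_min_subsequences source target out) := by unfold Spec_min_subsequences; infer_instance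

-- ===== CLAIM (what is proved, stated in full; the proofs are below) =====
def Claim_equal_min_subsequences : Prop := ∀ (source : String) (target : String), Dom_min_subsequences source target → Spec_min_subsequences source target (min_subsequences source target)

-- ===== LEMMAS AND PROOFS =====

-- first index k ≥ i with s[k] = c: the common specification both loops are reduced to
def findFrom (s : List Char) (c : Char) (i : Nat) : Option Nat :=
  if _h : i < s.length then
    if s.getD i default = c then some i else findFrom s c (i + 1)
  else none
termination_by s.length - i

-- the common spec loop: one wrap-around jump per target character
def sLoop (s : List Char) (t : List Char) (result : Int) (i : Nat) : Int :=
  match t with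
  | [] => result
  | c :: rest =>
    match findFrom s c i with
    | some k => sLoop s rest result (k + 1)
    | none =>
      match findFrom s c 0 with
      | some k => sLoop s rest (result + 1) (k + 1)
      | none => -1

-- ---- generic helpers ----

theorem pw_getD (lst : List Int) (hpw : lst.Pairwise (· < ·)) (a b : Nat)
    (hab : a ≤ b) (hb : b < lst.length) : lst.getD a 0 ≤ lst.getD b 0 := by
  rcases Nat.eq_or_lt_of_le hab with rfl | hlt
  · exact le_refl _
  · have := (List.pairwise_iff_getElem (R := (· < · : Int → Int → Prop)) (l := lst)).1 hpw
      a b (by omega) hb hlt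
    rw [List.getD_eq_getElem lst 0 (by omega), List.getD_eq_getElem lst 0 hb]
    exact this.le

-- ---- findFrom: characterisations ----

theorem findFrom_none_iff (s : List Char) (c : Char) (i : Nat) :
    findFrom s c i = none ↔ ∀ m, i ≤ m → m < s.length → s.getD m default ≠ c := by
  fun_induction findFrom s c i with
  | case1 i h heq =>
    constructor
    · intro h'; cases h'
    · intro h'; exact absurd heq (h' i (le_refl _) h)
  | case2 i h hne ih =>
    rw [ih]
    constructor
    · intro h' m him hm
      rcases Nat.eq_or_lt_of_le him with rfl | hlt
      · exact hne
      · exact h' m hlt hm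
    · intro h' m him hm; exact h' m (by omega) hm
  | case3 i h =>
    simp only [true_iff]
    intro m him hm; omega

theorem findFrom_none_of_not_mem (s : List Char) (c : Char) (i : Nat)
    (hc : c ∉ s) : findFrom s c i = none := by
  rw [findFrom_none_iff]
  intro m _ hm heq
  exact hc (heq ▸ (List.getD_eq_getElem s default hm ▸ List.getElem_mem hm))

theorem findFrom_first (s : List Char) (c : Char) (i : Nat) (k : Nat)
    (hk : k < s.length) (hik : i ≤ k) (hc : s.getD k default = c)
    (hmin : ∀ m, i ≤ m → m < k → s.getD m default ≠ c) :
    findFrom s c i = some k := by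
  fun_induction findFrom s c i with
  | case1 i h heq =>
    have h1 : ¬ i < k := fun hlt => hmin i (le_refl _) hlt heq
    have : i = k := by omega
    rw [this]
  | case2 i h hne ih =>
    have hik' : i + 1 ≤ k := by
      rcases Nat.eq_or_lt_of_le hik with rfl | h'
      · exact absurd hc hne
      · omega
    exact ih hik' (fun m hm hmk => hmin m (by omega) hmk)
  | case3 i h => omega

-- ---- occ: the occurrence list a dict value of buildPos holds ----

def occ (s : List Char) (c : Char) : List Int :=
  ((PySem.List.enumerate s 0).filter (fun p => p.2 == c)).map (·.1)

theorem occ_mem (s : List Char) (c : Char) (k : Int) :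
    k ∈ occ s c ↔ ∃ m : Nat, m < s.length ∧ k = (m : Int) ∧ s.getD m default = c := by
  simp only [occ, List.mem_map, List.mem_filter, PySem.List.mem_enumerate_iff]
  constructor
  · rintro ⟨⟨ki, ch⟩, ⟨⟨m, hm, hp⟩, hc⟩, rfl⟩
    injection hp with hp1 hp2
    refine ⟨m, hm, by omega, ?_⟩
    rw [List.getD_eq_getElem s default hm, ← hp2]
    exact beq_iff_eq.1 hc
  · rintro ⟨m, hm, rfl, hc⟩
    refine ⟨((0 : Int) + (m : Int), s[m]), ⟨⟨m, hm, rfl⟩, ?_⟩, by omega⟩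
    show (s[m] == c) = true
    rw [beq_iff_eq, ← List.getD_eq_getElem s default hm]
    exact hc

theorem occ_pairwise (s : List Char) (c : Char) : (occ s c).Pairwise (· < ·) := by
  unfold occ
  rw [List.pairwise_map]
  exact List.Pairwise.filter _ (PySem.List.pairwise_lt_enumerate s 0)

theorem buildPos_getD (s : List Char) (c : Char) :
    (buildPos s).getD c [] = occ s c := by
  unfold buildPos occ
  have h1 : (PySem.List.enumerate s 0).foldl (fun d p => d.modify p.2 [] (· ++ [p.1])) PySem.Dict.empty
      = ((PySem.List.enumerate s 0).map (fun p => (p.2, p.1))).foldl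
          (fun d q => d.modify q.1 [] (· ++ [q.2])) PySem.Dict.empty := by
    rw [List.foldl_map]
  rw [h1, PySem.Dict.getD_foldl_modify_append]
  simp [PySem.Dict.getD_empty, List.filter_map, List.map_map, Function.comp_def]

theorem buildPos_get?_none (s : List Char) (c : Char) :
    (buildPos s).get? c = none ↔ c ∉ s := by
  rw [PySem.Dict.get?_eq_none_iff_not_mem_keys]
  unfold buildPos
  have h := PySem.Dict.keys_foldl_modify_key (l := PySem.List.enumerate s 0)
    (key := fun p => p.2) (d0 := ([] : List Int)) (f := fun _ p => (· ++ [p.1]))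
    (d := (PySem.Dict.empty : PySem.Dict Char (List Int)))
  rw [h, PySem.Dict.keys_empty, PySem.Set.update_nil_left, PySem.List.map_snd_enumerate]
  exact not_congr (PySem.Set.mem_ofList s c)

theorem buildPos_get?_some (s : List Char) (c : Char) (lst : List Int)
    (h : (buildPos s).get? c = some lst) : lst = occ s c ∧ c ∈ s := by
  constructor
  · have := buildPos_getD s c
    rw [PySem.Dict.getD_eq_get?_getD, h] at this
    exact this
  · by_contra hc
    rw [(buildPos_get?_none s c).2 hc] at h
    cases h

-- ---- binary search: bsearch finds the first element ≥ i ----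

theorem bsearch_post (lst : List Int) (i : Int) (lo hi : Nat)
    (hpw : lst.Pairwise (· < ·)) (hhi : hi ≤ lst.length) (hle : lo ≤ hi)
    (h1 : ∀ m, m < lo → lst.getD m 0 < i)
    (h2 : ∀ m, hi ≤ m → m < lst.length → i ≤ lst.getD m 0) :
    (∀ m, m < bsearch lst i lo hi → lst.getD m 0 < i) ∧
    (∀ m, bsearch lst i lo hi ≤ m → m < lst.length → i ≤ lst.getD m 0) ∧
    bsearch lst i lo hi ≤ lst.length := by
  fun_induction bsearch lst i lo hi with
  | case1 lo hi hlt mid hmidlt ih =>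
    refine ih (by omega) (by omega) ?_ h2
    intro m hm
    rcases Nat.lt_or_ge m lo with h' | h'
    · exact h1 m h'
    · calc lst.getD m 0 ≤ lst.getD mid 0 := pw_getD lst hpw m mid (by omega) (by omega)
        _ < i := hmidlt
  | case2 lo hi hlt mid hmidge ih =>
    refine ih (by omega) (by omega) h1 ?_
    intro m hm hmlen
    calc i ≤ lst.getD mid 0 := by omega
      _ ≤ lst.getD m 0 := pw_getD lst hpw mid m hm hmlen
  | case3 lo hi hnlt =>
    exact ⟨fun m hm => h1 m hm, fun m hm hmlen => h2 m (by omega) hmlen, by omega⟩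

-- ---- occurrence list ⇒ findFrom ----

theorem occ_all_lt_none (s : List Char) (c : Char) (i : Nat)
    (h : ∀ x ∈ occ s c, x < (i : Int)) : findFrom s c i = none := by
  rw [findFrom_none_iff]
  intro m him hm heq
  have : (m : Int) ∈ occ s c := (occ_mem s c m).2 ⟨m, hm, rfl, heq⟩
  have := h _ this
  omega

theorem occ_first_ge (s : List Char) (c : Char) (i : Nat) (r : Nat)
    (hr : r < (occ s c).length)
    (hbelow : ∀ m, m < r → (occ s c).getD m 0 < (i : Int))
    (hge : (i : Int) ≤ (occ s c).getD r 0) :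
    ∃ m0 : Nat, (occ s c).getD r 0 = (m0 : Int) ∧ findFrom s c i = some m0 := by
  have hmem : (occ s c).getD r 0 ∈ occ s c := by
    rw [List.getD_eq_getElem _ 0 hr]; exact List.getElem_mem hr
  rcases (occ_mem s c _).1 hmem with ⟨m0, hm0, he, hc0⟩
  refine ⟨m0, he, findFrom_first s c i m0 hm0 (by omega) hc0 ?_⟩
  intro m him hmm0 heq
  have hmo : (m : Int) ∈ occ s c := (occ_mem s c m).2 ⟨m, by omega, rfl, heq⟩
  rcases List.mem_iff_getElem.1 hmo with ⟨idx, hidx, hi'⟩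
  rcases Nat.lt_or_ge idx r with h' | h'
  · have := hbelow idx h'
    rw [List.getD_eq_getElem _ 0 hidx, hi'] at this
    omega
  · have : (occ s c).getD r 0 ≤ (m : Int) := by
      rw [← hi', ← List.getD_eq_getElem _ 0 hidx]
      exact pw_getD _ (occ_pairwise s c) r idx h' hidx
    omega

-- ---- B equals the spec loop ----

theorem bLoop_eq_sLoop (s : List Char) (t : List Char) :
    ∀ (result : Int) (i : Nat),
      bLoop (buildPos s) t result (i : Int) = sLoop s t result i := by
  induction t with
  | nil => intro result i; rfl
  | cons c rest ih =>
    intro result i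
    rw [bLoop, sLoop]
    cases hb : (buildPos s).get? c with
    | none =>
      have hc : c ∉ s := (buildPos_get?_none s c).1 hb
      rw [findFrom_none_of_not_mem s c i hc, findFrom_none_of_not_mem s c 0 hc]
    | some lst =>
      rcases buildPos_get?_some s c lst hb with ⟨rfl, hcs⟩
      show (if bsearch (occ s c) ((i : Nat) : Int) 0 (occ s c).length = (occ s c).length
            then bLoop (buildPos s) rest (result + 1) ((occ s c).getD 0 0 + 1)
            else bLoop (buildPos s) rest result
              ((occ s c).getD (bsearch (occ s c) ((i : Nat) : Int) 0 (occ s c).length) 0 + 1)) = _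
      rcases bsearch_post (occ s c) (i : Int) 0 (occ s c).length (occ_pairwise s c)
          (le_refl _) (by omega) (by omega) (by omega) with ⟨p1, p2, p3⟩
      by_cases hlo : bsearch (occ s c) (i : Int) 0 (occ s c).length = (occ s c).length
      · -- nothing ≥ i: wrap around to the first occurrence
        have hnone : findFrom s c i = none := by
          refine occ_all_lt_none s c i ?_
          intro x hx
          rcases List.mem_iff_getElem.1 hx with ⟨idx, hidx, rfl⟩
          have := p1 idx (by omega)
          rwa [List.getD_eq_getElem _ 0 hidx] at this
        have hne : 0 < (occ s c).length := by
          rcases List.mem_iff_getElem.1 hcs with ⟨m, hm, hm'⟩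
          have : (m : Int) ∈ occ s c := (occ_mem s c m).2
            ⟨m, hm, rfl, by rw [List.getD_eq_getElem s default hm, hm']⟩
          exact List.length_pos_of_mem this
        have h0 : ((0 : Nat) : Int) ≤ (occ s c).getD 0 0 := by
          have hmem : (occ s c).getD 0 0 ∈ occ s c := by
            rw [List.getD_eq_getElem _ 0 hne]; exact List.getElem_mem hne
          rcases (occ_mem s c _).1 hmem with ⟨m0, _, he, _⟩
          rw [he]
          omega
        rcases occ_first_ge s c 0 0 hne (by omega) h0 with ⟨m0, he0, hf0⟩
        rw [if_pos hlo]
        simp only [hnone, hf0]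
        rw [he0]
        have hcast : (m0 : Int) + 1 = ((m0 + 1 : Nat) : Int) := by push_cast; ring
        rw [hcast, ih]
      · have hlt : bsearch (occ s c) (i : Int) 0 (occ s c).length < (occ s c).length := by omega
        rcases occ_first_ge s c i _ hlt (fun m hm => p1 m hm)
            (p2 _ (le_refl _) hlt) with ⟨m0, he0, hf⟩
        rw [if_neg hlo]
        simp only [hf]
        rw [he0]
        have hcast : (m0 : Int) + 1 = ((m0 + 1 : Nat) : Int) := by push_cast; ring
        rw [hcast, ih]

-- ---- A equals the spec loop ----

theorem aOuter_eq (s t : List Char) (result : Int) (j : Nat) (hj : j < t.length) :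
    aOuter s t result j =
      match aInner s t result 0 j false with
      | Sum.inl ans => ans
      | Sum.inr (j', found) => if found then aOuter s t (result + 1) j' else -1 := by
  rw [aOuter, dif_pos hj]
  cases haI : aInner s t result 0 j false with
  | inl a => rfl
  | inr p =>
    rcases p with ⟨j', f⟩
    rfl

theorem inner_spec (s t : List Char) (result : Int) (i j : Nat) (found : Bool)
    (hj : j < t.length) :
    aInner s t result i j found =
      match findFrom s (t.getD j default) i with
      | some k => if j + 1 = t.length then Sum.inl (result + 1)
                  else aInner s t result (k + 1) (j + 1) true
      | none => Sum.inr (j, found) := by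
  fun_induction aInner s t result i j found with
  | case1 i j found h heq hlen =>
    have hf : findFrom s (t.getD j default) i = some i := by
      rw [findFrom, dif_pos h, if_pos (beq_iff_eq.1 heq)]
    simp only [hf, if_pos hlen]
  | case2 i j found h heq hlen _ =>
    have hf : findFrom s (t.getD j default) i = some i := by
      rw [findFrom, dif_pos h, if_pos (beq_iff_eq.1 heq)]
    simp only [hf]
    rw [if_neg hlen]
  | case3 i j found h hne ih =>
    have hf : findFrom s (t.getD j default) i = findFrom s (t.getD j default) (i + 1) := by
      rw [findFrom, dif_pos h, if_neg (by simpa using hne)]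
    rw [hf]
    exact ih hj
  | case4 i j found h =>
    have hf : findFrom s (t.getD j default) i = none := by
      rw [findFrom, dif_neg h]
    simp only [hf]

theorem aInner_true_snd (s t : List Char) (result : Int) (i j : Nat)
    (j' : Nat) (f' : Bool) (h : aInner s t result i j true = Sum.inr (j', f')) :
    f' = true :=
  (aInner_inr s t result i j true j' f' h).1 rfl

-- the joint outer-loop / spec-loop correspondence, by induction on the remaining target
theorem outer_main (s t : List Char) :
    ∀ d j, t.length - j ≤ d → j < t.length →
      (∀ result : Int, aOuter s t result j =
        match findFrom s (t.getD j default) 0 with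
        | none => -1
        | some k => if j + 1 = t.length then result + 1
                    else sLoop s (t.drop (j + 1)) (result + 1) (k + 1)) ∧
      (∀ (i : Nat) (result : Int), sLoop s (t.drop j) (result + 1) i =
        match aInner s t result i j true with
        | Sum.inl a => a
        | Sum.inr (j', _) => aOuter s t (result + 1) j') := by
  intro d
  induction d with
  | zero => intro j hd hj; omega
  | succ d ih =>
    intro j hd hj
    have houter : ∀ result : Int, aOuter s t result j =
        match findFrom s (t.getD j default) 0 with
        | none => -1
        | some k => if j + 1 = t.length then result + 1
                    else sLoop s (t.drop (j + 1)) (result + 1) (k + 1) := by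
      intro result
      rw [aOuter_eq s t result j hj, inner_spec s t result 0 j false hj]
      cases hf : findFrom s (t.getD j default) 0 with
      | none => rfl
      | some k =>
        by_cases hlen : j + 1 = t.length
        · simp only [if_pos hlen]
        · simp only [if_neg hlen]
          rw [(ih (j + 1) (by omega) (by omega)).2 (k + 1) result]
          cases ha : aInner s t result (k + 1) (j + 1) true with
          | inl a => rfl
          | inr p =>
            rcases p with ⟨j', f'⟩
            have hft : f' = true := aInner_true_snd s t result (k + 1) (j + 1) j' f' ha
            subst hft
            simp
    refine ⟨houter, ?_⟩
    intro i result
    have hdrop : t.drop j = t.getD j default :: t.drop (j + 1) := by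
      rw [List.getD_eq_getElem t default hj]
      exact List.drop_eq_getElem_cons hj
    rw [hdrop, sLoop, inner_spec s t result i j true hj]
    cases hf : findFrom s (t.getD j default) i with
    | none =>
      show (match findFrom s (t.getD j default) 0 with
            | some k => sLoop s (t.drop (j + 1)) (result + 1 + 1) (k + 1)
            | none => (-1 : Int))
          = aOuter s t (result + 1) j
      rw [houter (result + 1)]
      cases hf0 : findFrom s (t.getD j default) 0 with
      | none => rfl
      | some k =>
        show sLoop s (t.drop (j + 1)) (result + 1 + 1) (k + 1)
          = if j + 1 = t.length then result + 1 + 1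
            else sLoop s (t.drop (j + 1)) (result + 1 + 1) (k + 1)
        by_cases hlen : j + 1 = t.length
        · rw [if_pos hlen]
          have hd : t.drop (j + 1) = [] := List.drop_eq_nil_of_le (by omega)
          rw [hd, sLoop]
        · rw [if_neg hlen]
    | some k =>
      show sLoop s (t.drop (j + 1)) (result + 1) (k + 1)
        = (match (if j + 1 = t.length then Sum.inl (result + 1)
                  else aInner s t result (k + 1) (j + 1) true : Int ⊕ (Nat × Bool)) with
           | Sum.inl a => a
           | Sum.inr (j', _) => aOuter s t (result + 1) j')
      by_cases hlen : j + 1 = t.length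
      · rw [if_pos hlen]
        have hd : t.drop (j + 1) = [] := List.drop_eq_nil_of_le (by omega)
        rw [hd, sLoop]
      · rw [if_neg hlen]
        rw [(ih (j + 1) (by omega) (by omega)).2 (k + 1) result]

theorem aOuter_eq_sLoop (s t : List Char) (ht : t ≠ []) :
    aOuter s t 0 0 = sLoop s t 1 0 := by
  have hj : 0 < t.length := by
    cases t with
    | nil => exact absurd rfl ht
    | cons a l => simp
  have houter := (outer_main s t t.length 0 (by omega) hj).1 0
  have hg : t.getD 0 default = t[0] := List.getD_eq_getElem t default hj
  have hdrop : t = t[0] :: t.drop 1 := by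
    have h := List.drop_eq_getElem_cons hj
    rw [List.drop_zero] at h
    simpa using h
  rw [houter, hg]
  conv_rhs => rw [hdrop, sLoop]
  cases hf : findFrom s t[0] 0 with
  | none => rfl
  | some k =>
    show (if 0 + 1 = t.length then (0 : Int) + 1 else sLoop s (t.drop (0 + 1)) (0 + 1) (k + 1))
        = sLoop s (t.drop 1) 1 (k + 1)
    by_cases hlen : 0 + 1 = t.length
    · rw [if_pos hlen]
      have hd1 : t.drop 1 = [] := List.drop_eq_nil_of_le (by omega)
      rw [hd1, sLoop]
      norm_num
    · rw [if_neg hlen]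
      norm_num

theorem sLoop_missing (s : List Char) :
    ∀ (t : List Char) (result : Int) (i : Nat),
      (∃ c ∈ t, c ∉ s) → sLoop s t result i = -1 := by
  intro t
  induction t with
  | nil => rintro result i ⟨c, hc, _⟩; cases hc
  | cons c rest ih =>
    rintro result i ⟨c0, hc0, hc0s⟩
    rw [sLoop]
    rcases List.mem_cons.1 hc0 with rfl | hmem
    · rw [findFrom_none_of_not_mem s c0 i hc0s, findFrom_none_of_not_mem s c0 0 hc0s]
    · cases findFrom s c i with
      | none =>
        cases findFrom s c 0 with
        | none => rfl
        | some k => exact ih (result + 1) (k + 1) ⟨c0, hmem, hc0s⟩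
      | some k => exact ih result (k + 1) ⟨c0, hmem, hc0s⟩

-- ===== VERDICT (by name: the statement is the Claim_ definition above) =====
theorem min_subsequences_spec : Claim_equal_min_subsequences := by
  intro source target _
  unfold Spec_min_subsequences
  show min_subsequences source target = min_subsequences_alt source target
  show (if (target.toList.any fun ch => !source.toList.contains ch) = true then -1
        else aOuter source.toList target.toList 0 0)
      = bLoop (buildPos source.toList) target.toList
          (if target.toList = [] then 0 else 1) 0
  by_cases ht : target.toList = []
  · rw [ht]
    simp only [List.any_nil]
    rw [if_neg (by simp)]
    rw [aOuter]
    simp [bLoop]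
  · rw [if_neg ht]
    have hB : bLoop (buildPos source.toList) target.toList 1 ((0 : Nat) : Int)
        = sLoop source.toList target.toList 1 0 :=
      bLoop_eq_sLoop source.toList target.toList 1 0
    rw [show ((0 : Nat) : Int) = (0 : Int) from rfl] at hB
    rw [hB]
    by_cases hm : (target.toList.any fun ch => !source.toList.contains ch) = true
    · rw [if_pos hm]
      rcases List.any_eq_true.1 hm with ⟨c, hc, hcs⟩
      exact (sLoop_missing source.toList target.toList 1 0 ⟨c, hc, by simpa using hcs⟩).symm
    · rw [if_neg hm]
      exact aOuter_eq_sLoop source.toList target.toList ht
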